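-- pv_equiv track=rewrite | github.com/phantranthienan/LeetCode | Problems&Solutions/DSA/DynamicProgramming/maxLengthPairChain.py | greedyLongestChain
-- ===== SOURCE A (Python) =====
-- def greedyLongestChain(pairs):
--     pairs.sort(key = lambda x: x[1])
--     count = 1
--     finish = pairs[0][1]
--     for i in range(1, len(pairs)):
--         if pairs[i][0] > finish:
--             count += 1
--             finish = pairs[i][1]
--
--     return count
-- ===== SOURCE B (Python) =====
-- def greedyLongestChain(pairs):
--     pairs.sort(key=lambda x: x[1])
--     dp = []  # dp[j] = (end of pair j, longest chain ending at pair j)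
--     for p in pairs:
--         best = 1
--         for e, v in dp:
--             if e < p[0] and v + 1 > best:
--                 best = v + 1
--         dp.append((p[1], best))
--     return max(v for e, v in dp)
-- ===== Notes on version B (the rewrite author's own statement) =====
-- stated objective: alternative
-- what changed: Replaces the greedy sweep (count pairs whose start exceeds the running finish) by an O(n^2) longest-chain dynamic programming over the end-sorted list, returning the maximum chain length ending at any pair; both sort the argument in place by second element.
import Mathlib
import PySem

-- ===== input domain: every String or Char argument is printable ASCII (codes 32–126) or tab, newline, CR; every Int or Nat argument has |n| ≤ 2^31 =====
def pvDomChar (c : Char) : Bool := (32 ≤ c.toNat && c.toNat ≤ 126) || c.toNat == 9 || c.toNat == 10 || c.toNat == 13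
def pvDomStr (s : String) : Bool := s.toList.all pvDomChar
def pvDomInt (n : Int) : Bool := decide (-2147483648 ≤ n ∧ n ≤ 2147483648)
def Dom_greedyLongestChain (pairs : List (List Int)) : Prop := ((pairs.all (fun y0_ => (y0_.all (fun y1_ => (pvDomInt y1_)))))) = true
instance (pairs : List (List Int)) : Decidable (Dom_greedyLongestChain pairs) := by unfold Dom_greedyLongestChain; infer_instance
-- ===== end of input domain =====

-- B replaces A's greedy sweep by an O(n^2) longest-chain DP over the end-sorted list (alternative algorithm, same result);
-- both Pythons sort the argument in place by second element, and the equivalence proved here is about the return value.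

-- ===== PORT A =====
def greedyLongestChain (pairs : List (List Int)) : Int :=
  let s := PySem.List.sorted pairs (fun x => PySem.List.pyGetD x 1 0) false
  let st := (PySem.List.pyRange 1 (s.length : Int) 1).foldl
    (fun (st : Int × Int) i =>
      if PySem.List.pyGetD (PySem.List.pyGetD s i []) 0 0 > st.2 then
        (st.1 + 1, PySem.List.pyGetD (PySem.List.pyGetD s i []) 1 0)
      else st)
    (1, PySem.List.pyGetD (PySem.List.pyGetD s 0 []) 1 0)
  st.1

-- ===== PORT B =====
def greedyLongestChain_alt (pairs : List (List Int)) : Int :=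
  let s := PySem.List.sorted pairs (fun x => PySem.List.pyGetD x 1 0) false
  let dp := s.foldl
    (fun (dp : List (Int × Int)) p =>
      let best := dp.foldl
        (fun b q => if q.1 < PySem.List.pyGetD p 0 0 ∧ q.2 + 1 > b then q.2 + 1 else b) 1
      dp ++ [(PySem.List.pyGetD p 1 0, best)]) []
  (PySem.List.max? (dp.map (fun q => q.2)) (fun v => v)).getD 0

-- ===== PRECONDITION & SPEC =====
-- Pre_ excludes exactly the inputs on which the Python A raises: the empty list (pairs[0] -> IndexError)
-- and any row of length < 2 (x[1] in the sort key / pairs[i][0] -> IndexError).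
def Pre_greedyLongestChain (pairs : List (List Int)) : Prop :=
  pairs ≠ [] ∧ ∀ p ∈ pairs, 2 ≤ p.length
instance (pairs : List (List Int)) : Decidable (Pre_greedyLongestChain pairs) := by
  unfold Pre_greedyLongestChain; infer_instance
def pvWitness_greedyLongestChain : List (List Int) := [[3, 4], [1, 2], [2, 3]]

def Spec_greedyLongestChain (pairs : List (List Int)) (out : Int) : Prop := out = greedyLongestChain_alt pairs
instance (pairs : List (List Int)) (out : Int) : Decidable (Spec_greedyLongestChain pairs out) := by unfold Spec_greedyLongestChain; infer_instance

-- ===== CLAIM (what is proved, stated in full; the proofs are below) =====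
def Claim_equal_greedyLongestChain : Prop := ∀ (pairs : List (List Int)), Dom_greedyLongestChain pairs → Pre_greedyLongestChain pairs → Spec_greedyLongestChain pairs (greedyLongestChain pairs)

-- ===== LEMMAS AND PROOFS =====

-- A's loop body, on the row it reads
def pvGStep (st : Int × Int) (p : List Int) : Int × Int :=
  if PySem.List.pyGetD p 0 0 > st.2 then (st.1 + 1, PySem.List.pyGetD p 1 0) else st

-- B's outer-loop body
def pvDStep (dp : List (Int × Int)) (p : List Int) : List (Int × Int) :=
  dp ++ [(PySem.List.pyGetD p 1 0,
          dp.foldl (fun b q => if q.1 < PySem.List.pyGetD p 0 0 ∧ q.2 + 1 > b then q.2 + 1 else b) 1)]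

-- lower bounds for B's inner fold
lemma pvBest_lo (x : Int) (dp : List (Int × Int)) : ∀ b0 : Int,
    b0 ≤ dp.foldl (fun b q => if q.1 < x ∧ q.2 + 1 > b then q.2 + 1 else b) b0 ∧
    ∀ q ∈ dp, q.1 < x → q.2 + 1 ≤ dp.foldl (fun b q => if q.1 < x ∧ q.2 + 1 > b then q.2 + 1 else b) b0 := by
  induction dp with
  | nil => intro b0; exact ⟨le_refl _, by simp⟩
  | cons q0 t ih =>
    intro b0
    simp only [List.foldl_cons]
    set b1 := if q0.1 < x ∧ q0.2 + 1 > b0 then q0.2 + 1 else b0 with hb1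
    have hle : b0 ≤ b1 := by rw [hb1]; split_ifs with h <;> omega
    refine ⟨le_trans hle (ih b1).1, ?_⟩
    intro q hq hqx
    rcases List.mem_cons.mp hq with rfl | hq
    · have : q.2 + 1 ≤ b1 := by rw [hb1]; split_ifs with h <;> omega
      exact le_trans this (ih b1).1
    · exact (ih b1).2 q hq hqx

-- upper bound for B's inner fold
lemma pvBest_hi (x m : Int) (dp : List (Int × Int)) : ∀ b0 : Int, b0 ≤ m →
    (∀ q ∈ dp, q.1 < x → q.2 + 1 ≤ m) →
    dp.foldl (fun b q => if q.1 < x ∧ q.2 + 1 > b then q.2 + 1 else b) b0 ≤ m := by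
  induction dp with
  | nil => intro b0 h _; exact h
  | cons q0 t ih =>
    intro b0 hb0 hall
    simp only [List.foldl_cons]
    refine ih _ ?_ (fun q hq hqx => hall q (List.mem_cons_of_mem _ hq) hqx)
    split_ifs with h
    · exact hall q0 List.mem_cons_self h.1
    · exact hb0

-- the joint invariant between the greedy state and the DP table, preserved along the sorted tail
lemma pvInv_main : ∀ (rest : List (List Int)) (dv : List (Int × Int)) (c f : Int),
    1 ≤ c →
    (∀ q ∈ dv, q.2 ≤ c) →
    (∃ q ∈ dv, q.2 = c ∧ q.1 = f) →
    (∀ q ∈ dv, q.2 = c → f ≤ q.1) →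
    (∀ q ∈ dv, ∀ p ∈ rest, q.1 ≤ PySem.List.pyGetD p 1 0) →
    rest.Pairwise (fun p p' => PySem.List.pyGetD p 1 0 ≤ PySem.List.pyGetD p' 1 0) →
    (∀ q ∈ rest.foldl pvDStep dv, q.2 ≤ (rest.foldl pvGStep (c, f)).1) ∧
    (∃ q ∈ rest.foldl pvDStep dv, q.2 = (rest.foldl pvGStep (c, f)).1) := by
  intro rest
  induction rest with
  | nil =>
    intro dv c f _ hbd hwit _ _ _
    obtain ⟨q0, hq0, hq0c, _⟩ := hwit
    exact ⟨hbd, ⟨q0, hq0, hq0c⟩⟩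
  | cons p rest' ih =>
    intro dv c f hc hbd hwit hmin hsort hpw
    obtain ⟨q0, hq0, hq0c, hq0f⟩ := hwit
    have hhead : ∀ p' ∈ rest', PySem.List.pyGetD p 1 0 ≤ PySem.List.pyGetD p' 1 0 :=
      (List.pairwise_cons.mp hpw).1
    have hpw' := (List.pairwise_cons.mp hpw).2
    have hdvp : ∀ q ∈ dv, q.1 ≤ PySem.List.pyGetD p 1 0 := fun q hq =>
      hsort q hq p List.mem_cons_self
    have hdvrest : ∀ q ∈ dv, ∀ p' ∈ rest', q.1 ≤ PySem.List.pyGetD p' 1 0 := fun q hq p' hp' =>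
      hsort q hq p' (List.mem_cons_of_mem _ hp')
    simp only [List.foldl_cons]
    set x := PySem.List.pyGetD p 0 0 with hx
    set e := PySem.List.pyGetD p 1 0 with he
    set b := dv.foldl (fun b q => if q.1 < x ∧ q.2 + 1 > b then q.2 + 1 else b) 1 with hb
    have hdstep : pvDStep dv p = dv ++ [(e, b)] := rfl
    by_cases hgt : x > f
    · -- greedy extends: b = c + 1
      have hble : b ≤ c + 1 := pvBest_hi x (c + 1) dv 1 (by omega)
        (fun q hq _ => by have := hbd q hq; omega)
      have hbge : c + 1 ≤ b := by
        have := (pvBest_lo x dv 1).2 q0 hq0 (by omega)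
        omega
      have hbeq : b = c + 1 := le_antisymm hble hbge
      have hgstep : pvGStep (c, f) p = (c + 1, e) := by
        unfold pvGStep; rw [if_pos hgt]
      rw [hdstep, hbeq, hgstep]
      refine ih (dv ++ [(e, c + 1)]) (c + 1) e (by omega) ?_ ?_ ?_ ?_ hpw'
      · intro q hq
        rcases List.mem_append.mp hq with hq | hq
        · have := hbd q hq; omega
        · simp only [List.mem_singleton] at hq; subst hq; exact le_refl _
      · exact ⟨(e, c + 1), List.mem_append_right _ (List.mem_singleton.mpr rfl), rfl, rfl⟩
      · intro q hq hqc
        rcases List.mem_append.mp hq with hq | hq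
        · have := hbd q hq; omega
        · simp only [List.mem_singleton] at hq; subst hq; exact le_refl _
      · intro q hq p' hp'
        rcases List.mem_append.mp hq with hq | hq
        · exact hdvrest q hq p' hp'
        · simp only [List.mem_singleton] at hq; subst hq; exact hhead p' hp'
    · -- greedy state unchanged: b ≤ c
      have hble : b ≤ c := pvBest_hi x c dv 1 hc
        (fun q hq hqx => by
          have h1 := hbd q hq
          have h2 : q.2 ≠ c := fun hqc => by have := hmin q hq hqc; omega
          omega)
      have hgstep : pvGStep (c, f) p = (c, f) := by
        unfold pvGStep; rw [if_neg hgt]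
      have hfe : f ≤ e := by rw [← hq0f]; exact hdvp q0 hq0
      rw [hdstep, hgstep]
      refine ih (dv ++ [(e, b)]) c f hc ?_ ?_ ?_ ?_ hpw'
      · intro q hq
        rcases List.mem_append.mp hq with hq | hq
        · exact hbd q hq
        · simp only [List.mem_singleton] at hq; subst hq; exact hble
      · exact ⟨q0, List.mem_append_left _ hq0, hq0c, hq0f⟩
      · intro q hq hqc
        rcases List.mem_append.mp hq with hq | hq
        · exact hmin q hq hqc
        · simp only [List.mem_singleton] at hq; subst hq; exact hfe
      · intro q hq p' hp'
        rcases List.mem_append.mp hq with hq | hq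
        · exact hdvrest q hq p' hp'
        · simp only [List.mem_singleton] at hq; subst hq; exact hhead p' hp'

lemma pvMax_eq (l : List Int) (c : Int) (h1 : ∀ v ∈ l, v ≤ c) (h2 : c ∈ l) :
    PySem.List.max? l (fun v => v) = some c := by
  have hne : l ≠ [] := by rintro rfl; exact absurd h2 (by simp)
  obtain ⟨m, hm⟩ : ∃ m, PySem.List.max? l (fun v => v) = some m := by
    rcases Option.eq_none_or_eq_some (PySem.List.max? l (fun v => v)) with h | h
    · exact absurd ((PySem.List.max?_eq_none_iff l (fun v => v)).mp h) hne
    · exact h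
  have h3 : m ∈ l := PySem.List.max?_mem hm
  have h4 : c ≤ m := PySem.List.max?_isMax hm c h2
  have h5 : m ≤ c := h1 m h3
  rw [hm]; congr 1; omega

-- ===== VERDICT (by name: the statement is the Claim_ definition above) =====
theorem greedyLongestChain_spec : Claim_equal_greedyLongestChain := by
  intro pairs _ hpre
  obtain ⟨hne, _⟩ := hpre
  unfold Spec_greedyLongestChain
  set s := PySem.List.sorted pairs (fun x => PySem.List.pyGetD x 1 0) false with hs
  have hsne : s ≠ [] := by
    rw [hs]; intro h; exact hne ((PySem.List.sorted_eq_nil_iff _ _ _).mp h)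
  obtain ⟨p0, rest, hcons⟩ := List.exists_cons_of_ne_nil hsne
  have hpair : s.Pairwise (fun a b => PySem.List.pyGetD a 1 0 ≤ PySem.List.pyGetD b 1 0) := by
    rw [hs]; exact PySem.List.sorted_pairwise pairs (fun x => PySem.List.pyGetD x 1 0)
  rw [hcons] at hpair
  have hhead := (List.pairwise_cons.mp hpair).1
  have hpw := (List.pairwise_cons.mp hpair).2
  have hA : greedyLongestChain pairs =
      ((PySem.List.pyRange 1 (s.length : Int) 1).foldl
        (fun (st : Int × Int) i => pvGStep st (PySem.List.pyGetD s i []))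
        (1, PySem.List.pyGetD (PySem.List.pyGetD s 0 []) 1 0)).1 := rfl
  rw [PySem.List.foldl_pyRange_pyGetD' s [] pvGStep
        (1, PySem.List.pyGetD (PySem.List.pyGetD s 0 []) 1 0) (by omega)] at hA
  rw [hcons] at hA
  simp only [Int.toNat_one, List.drop_succ_cons, List.drop_zero,
    PySem.List.pyGetD_zero_cons] at hA
  have hB : greedyLongestChain_alt pairs =
      (PySem.List.max? ((s.foldl pvDStep []).map (fun q => q.2)) (fun v => v)).getD 0 := rfl
  rw [hcons] at hB
  simp only [List.foldl_cons] at hB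
  have hd0 : pvDStep [] p0 = [(PySem.List.pyGetD p0 1 0, 1)] := rfl
  rw [hd0] at hB
  obtain ⟨h1, q, hq, hq2⟩ :=
    pvInv_main rest [(PySem.List.pyGetD p0 1 0, 1)] 1 (PySem.List.pyGetD p0 1 0)
      (le_refl 1)
      (by intro q hq; simp only [List.mem_singleton] at hq; subst hq; exact le_refl _)
      ⟨(PySem.List.pyGetD p0 1 0, 1), List.mem_singleton.mpr rfl, rfl, rfl⟩
      (by intro q hq _; simp only [List.mem_singleton] at hq; subst hq; exact le_refl _)
      (by intro q hq p hp; simp only [List.mem_singleton] at hq; subst hq; exact hhead p hp)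
      hpw
  have hmax : PySem.List.max?
      ((rest.foldl pvDStep [(PySem.List.pyGetD p0 1 0, 1)]).map (fun q => q.2)) (fun v => v)
      = some ((rest.foldl pvGStep (1, PySem.List.pyGetD p0 1 0)).1) := by
    refine pvMax_eq _ _ ?_ ?_
    · intro v hv
      obtain ⟨q', hq', rfl⟩ := List.mem_map.mp hv
      exact h1 q' hq'
    · exact List.mem_map.mpr ⟨q, hq, hq2⟩
  rw [hA, hB, hmax]
  rfl
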